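-- pv_equiv track=rewrite | github.com/solids4foam/cardiacFoam | tutorials/manufacturedFDA/setupManufacturedFDA/post_processing_manufactured.py | select_representative_ecg_cases
-- ===== SOURCE A (Python) =====
-- def select_representative_ecg_cases(cases):
--     grouped = {}
--     for case in cases:
--         key = (case["Dimension"], case["Solver"])
--         current = grouped.get(key)
--         if current is None or int(case["N"]) > int(current["N"]):
--             grouped[key] = case
--     return [grouped[key] for key in sorted(grouped)]
-- ===== SOURCE B (Python) =====
-- def select_representative_ecg_cases(cases):
--     # Sort-then-group: stable-sort by (Dimension, Solver), then one linear scan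
--     # merging adjacent equal-key runs, keeping the first case with maximal int(N).
--     ordered = sorted(cases, key=lambda c: (c["Dimension"], c["Solver"]))
--     result = []
--     pending = None
--     for c in ordered:
--         if pending is not None and (pending["Dimension"], pending["Solver"]) == (
--             c["Dimension"],
--             c["Solver"],
--         ):
--             if int(c["N"]) > int(pending["N"]):
--                 pending = c
--         else:
--             if pending is not None:
--                 result.append(pending)
--             pending = c
--     if pending is not None:
--         result.append(pending)
--     return result
-- ===== Notes on version B (the rewrite author's own statement) =====
-- stated objective: alternative
-- what changed: Replaces A's single-pass dict accumulation (hash map key -> running best, then sort the keys) by a stable sort of the cases on (Dimension, Solver) followed by one linear scan that merges adjacent equal-key runs, keeping the first max-N case of each run; stability of the sort preserves A's first-encountered tie-breaking.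
import Mathlib
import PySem

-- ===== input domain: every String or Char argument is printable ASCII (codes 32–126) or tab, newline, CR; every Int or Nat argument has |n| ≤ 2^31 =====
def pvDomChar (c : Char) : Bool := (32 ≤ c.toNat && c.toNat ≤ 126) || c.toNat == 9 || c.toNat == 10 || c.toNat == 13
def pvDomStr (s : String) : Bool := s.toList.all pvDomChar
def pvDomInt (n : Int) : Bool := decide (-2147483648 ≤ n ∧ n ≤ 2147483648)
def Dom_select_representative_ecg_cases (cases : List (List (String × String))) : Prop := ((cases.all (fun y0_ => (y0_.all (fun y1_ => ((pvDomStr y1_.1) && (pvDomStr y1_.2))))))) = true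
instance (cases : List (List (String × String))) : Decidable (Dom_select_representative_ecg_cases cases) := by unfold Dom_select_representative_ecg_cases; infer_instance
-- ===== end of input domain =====

-- A accumulates the max-N case per (Dimension, Solver) key in a dict and sorts the keys;
-- B stable-sorts the cases by that key and merges adjacent equal-key runs in one scan:
-- an alternative sort-then-group decomposition, same return value.


-- ===== PORT A =====
-- A-side accessors for case["Dimension"], case["Solver"], int(case["N"]);
-- total via getD, exact under Pre_ (keys present, N parses where compared).
def caseKey (c : List (String × String)) : String × String :=
  ((PySem.Dict.get? ⟨c⟩ "Dimension").getD "", (PySem.Dict.get? ⟨c⟩ "Solver").getD "")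

def caseN (c : List (String × String)) : Int :=
  ((PySem.Dict.get? ⟨c⟩ "N").bind PySem.Int.ofStr?).getD 0

-- the body of A's loop: conditional overwrite of the running best for the case's key
def stepA (g : PySem.Dict (String × String) (List (String × String)))
    (c : List (String × String)) : PySem.Dict (String × String) (List (String × String)) :=
  match g.get? (caseKey c) with
  | none => g.insert (caseKey c) c
  | some cur => if caseN c > caseN cur then g.insert (caseKey c) c else g

-- grouped[key] is ported as get?/getD []: every key of the comprehension is a key of
-- grouped, so the KeyError branch is unreachable and the port is exact.
def select_representative_ecg_cases (cases : List (List (String × String))) : List (List (String × String)) :=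
  (PySem.List.sorted2 (cases.foldl stepA PySem.Dict.empty).keys Prod.fst Prod.snd false).map
    (fun k => ((cases.foldl stepA PySem.Dict.empty).get? k).getD [])

-- ===== PORT B =====
-- the body of B's scan over the sorted list: state = (result, pending); an adjacent
-- case with the pending case's key may replace it (strictly larger int(N)), a case
-- with a new key flushes the pending case to the result.
def scanStep (st : List (List (String × String)) × Option (List (String × String)))
    (c : List (String × String)) : List (List (String × String)) × Option (List (String × String)) :=
  match st.2 with
  | some p =>
    if ((PySem.Dict.get? ⟨p⟩ "Dimension").getD "", (PySem.Dict.get? ⟨p⟩ "Solver").getD "")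
        = ((PySem.Dict.get? ⟨c⟩ "Dimension").getD "", (PySem.Dict.get? ⟨c⟩ "Solver").getD "") then
      if ((PySem.Dict.get? ⟨c⟩ "N").bind PySem.Int.ofStr?).getD 0
          > ((PySem.Dict.get? ⟨p⟩ "N").bind PySem.Int.ofStr?).getD 0 then (st.1, some c)
      else (st.1, some p)
    else (st.1 ++ [p], some c)
  | none => (st.1, some c)

-- sorted(cases, key=lambda c: (c["Dimension"], c["Solver"])) is sorted2 (stable),
-- then the scan; the trailing 'if pending is not None: result.append(pending)'.
def select_representative_ecg_cases_alt (cases : List (List (String × String))) : List (List (String × String)) :=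
  match (PySem.List.sorted2 cases
      (fun c => (PySem.Dict.get? ⟨c⟩ "Dimension").getD "")
      (fun c => (PySem.Dict.get? ⟨c⟩ "Solver").getD "") false).foldl scanStep ([], none) with
  | (res, some p) => res ++ [p]
  | (res, none) => res

-- ===== PRECONDITION & SPEC =====
-- Pre_ excludes exactly the inputs where the Python raises: a case missing "Dimension" or
-- "Solver" (KeyError), or a case whose (Dimension, Solver) key occurs more than once while
-- its "N" is missing or does not parse as an int (KeyError/ValueError when compared);
-- an unparsable "N" on a singleton group is never touched (short-circuit) and stays inside.
def Pre_select_representative_ecg_cases (cases : List (List (String × String))) : Prop :=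
  ∀ c ∈ cases, ((PySem.Dict.get? ⟨c⟩ "Dimension").isSome = true)
    ∧ ((PySem.Dict.get? ⟨c⟩ "Solver").isSome = true)
    ∧ (2 ≤ (cases.map caseKey).count (caseKey c) →
        ((PySem.Dict.get? ⟨c⟩ "N").bind PySem.Int.ofStr?).isSome = true)
instance (cases : List (List (String × String))) : Decidable (Pre_select_representative_ecg_cases cases) := by
  unfold Pre_select_representative_ecg_cases; infer_instance

def pvWitness_select_representative_ecg_cases : (List (List (String × String))) :=
  [[("Dimension", "2"), ("Solver", "fe"), ("N", "10")],
   [("Dimension", "2"), ("Solver", "fe"), ("N", "40")],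
   [("Dimension", "1"), ("Solver", "fv"), ("N", "7")]]

def Spec_select_representative_ecg_cases (cases : List (List (String × String))) (out : List (List (String × String))) : Prop := out = select_representative_ecg_cases_alt cases
instance (cases : List (List (String × String))) (out : List (List (String × String))) : Decidable (Spec_select_representative_ecg_cases cases out) := by unfold Spec_select_representative_ecg_cases; infer_instance

-- ===== CLAIM (what is proved, stated in full; the proofs are below) =====
def Claim_equal_select_representative_ecg_cases : Prop := ∀ (cases : List (List (String × String))), Dom_select_representative_ecg_cases cases → Pre_select_representative_ecg_cases cases → Spec_select_representative_ecg_cases cases (select_representative_ecg_cases cases)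

-- ===== LEMMAS AND PROOFS =====

-- the lexicographic sort key both programs order by
def Key (c : List (String × String)) : Lex ((String × String)) := toLex (caseKey c)

-- A's dict loop, observed at one key k (proof-side view of stepA)
def stepB (k : String × String) (best : Option (List (String × String)))
    (c : List (String × String)) : Option (List (String × String)) :=
  if caseKey c = k then
    match best with
    | none => some c
    | some b => if caseN c > caseN b then some c else best
  else best

-- a plain running max-N scan (no key test)
def bestStepO (b : Option (List (String × String))) (c : List (String × String)) :
    Option (List (String × String)) :=
  match b with
  | none => some c
  | some p => if caseN c > caseN p then some c else some p

def runBest (b : Option (List (String × String))) (l : List (List (String × String))) :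
    Option (List (String × String)) :=
  l.foldl bestStepO b

def bestStep (p c : List (String × String)) : List (String × String) :=
  if caseN c > caseN p then c else p

def sameK (c : List (String × String)) : List (String × String) → Bool :=
  fun d => decide (caseKey d = caseKey c)

-- B's scan as a structural recursion on the (sorted) list
def gScan : Option (List (String × String)) → List (List (String × String)) → List (List (String × String))
  | some p, [] => [p]
  | none, [] => []
  | none, c :: l => gScan (some c) l
  | some p, c :: l =>
    if caseKey p = caseKey c then
      (if caseN c > caseN p then gScan (some c) l else gScan (some p) l)
    else p :: gScan (some c) l

-- the per-group view of the scan: head group's best, then recurse past the group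
def groupBest : List (List (String × String)) → List (List (String × String))
  | [] => []
  | c :: l => ((l.takeWhile (sameK c)).foldl bestStep c) :: groupBest (l.dropWhile (sameK c))
termination_by l => l.length
decreasing_by
  simp only [List.length_cons]
  exact Nat.lt_succ_of_le (List.length_dropWhile_le _ _)

-- the distinct keys of a (sorted) list, in order of first appearance
def keysOf : List (List (String × String)) → List (String × String)
  | [] => []
  | c :: l => caseKey c :: keysOf (l.dropWhile (sameK c))
termination_by l => l.length
decreasing_by
  simp only [List.length_cons]
  exact Nat.lt_succ_of_le (List.length_dropWhile_le _ _)

-- ---- A-side: the dict observed at a key, and its key list ----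

theorem stepA_get? (d : PySem.Dict (String × String) (List (String × String)))
    (c : List (String × String)) (k : String × String) :
    (stepA d c).get? k = stepB k (d.get? k) c := by
  by_cases h : caseKey c = k
  · subst h
    unfold stepA stepB
    cases hg : d.get? (caseKey c) with
    | none => simp [PySem.Dict.get?_insert_self]
    | some cur =>
      simp only []
      split <;> simp [hg, PySem.Dict.get?_insert_self]
  · unfold stepA stepB
    have h' : k ≠ caseKey c := fun e => h e.symm
    cases hg : d.get? (caseKey c) with
    | none => simp [h, PySem.Dict.get?_insert_of_ne _ _ h']
    | some cur =>
      simp only [if_neg h]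
      split <;> simp [PySem.Dict.get?_insert_of_ne _ _ h']

theorem foldl_get? (cases : List (List (String × String))) :
    ∀ (d : PySem.Dict (String × String) (List (String × String))) (k : String × String),
      (cases.foldl stepA d).get? k = cases.foldl (stepB k) (d.get? k) := by
  induction cases with
  | nil => intro d k; rfl
  | cons c rest ih =>
    intro d k
    simp only [List.foldl_cons]
    rw [ih, stepA_get?]

theorem stepA_keys (d : PySem.Dict (String × String) (List (String × String)))
    (c : List (String × String)) :
    (stepA d c).keys = PySem.Set.add d.keys (caseKey c) := by
  unfold stepA
  cases hg : d.get? (caseKey c) with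
  | none =>
    have hnc : d.contains (caseKey c) = false := by
      rw [PySem.Dict.contains_eq_isSome_get?, hg]; rfl
    have hnm : caseKey c ∉ d.keys := by
      rw [← PySem.Dict.contains_iff_mem_keys]
      simp [hnc]
    rw [PySem.Dict.keys_insert_of_not_contains _ _ hnc]
    unfold PySem.Set.add PySem.Set.contains
    simp [hnm]
  | some cur =>
    have hc : d.contains (caseKey c) = true := by
      rw [PySem.Dict.contains_eq_isSome_get?, hg]; rfl
    have hm : caseKey c ∈ d.keys := (PySem.Dict.contains_iff_mem_keys _ _).mp hc
    have hadd : PySem.Set.add d.keys (caseKey c) = d.keys := by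
      unfold PySem.Set.add PySem.Set.contains
      simp [hm]
    rw [hadd]
    simp only []
    split
    · exact PySem.Dict.keys_insert_of_contains _ _ hc
    · rfl

theorem foldl_keys (cases : List (List (String × String))) :
    ∀ (d : PySem.Dict (String × String) (List (String × String))),
      (cases.foldl stepA d).keys = PySem.Set.update d.keys (cases.map caseKey) := by
  induction cases with
  | nil => intro d; simp [PySem.Set.update]
  | cons c rest ih =>
    intro d
    simp only [List.foldl_cons, List.map_cons, PySem.Set.update_cons]
    rw [ih, stepA_keys]

-- ---- sorted2 is sorted with the lexicographic tuple key ----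

theorem sorted2_eq_sorted_toLex {α κ₁ κ₂ : Type} [LinearOrder κ₁] [LinearOrder κ₂]
    (xs : List α) (k1 : α → κ₁) (k2 : α → κ₂) :
    PySem.List.sorted2 xs k1 k2 false
      = PySem.List.sorted xs (fun x => (toLex (k1 x, k2 x) : Lex (κ₁ × κ₂))) false := by
  have hbef : (fun (a b : α) => decide (k1 a < k1 b) || (!decide (k1 b < k1 a) && decide (k2 a < k2 b)))
      = (fun (a b : α) => decide ((toLex (k1 a, k2 a) : Lex (κ₁ × κ₂)) < toLex (k1 b, k2 b))) := by
    funext a b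
    simp only [Prod.Lex.toLex_lt_toLex]
    rcases lt_trichotomy (k1 a) (k1 b) with h | h | h
    · simp [h]
    · simp [h]
    · simp [h.asymm, h, h.ne']
  unfold PySem.List.sorted2 PySem.List.sorted
  simp only [if_neg (by decide : ¬ (false = true))]
  rw [hbef]

-- ---- stability: filtering one key class commutes with the sort ----

theorem filter_insertBy_of_ne {α κ : Type} [LinearOrder κ] (key : α → κ) (t : κ)
    (x : α) (ys : List α) (hx : ¬ key x = t) :
    (PySem.List.insertBy (fun a b => decide (key a < key b)) x ys).filter
        (fun c => decide (key c = t))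
      = ys.filter (fun c => decide (key c = t)) := by
  induction ys with
  | nil => simp [PySem.List.insertBy, hx]
  | cons y ys ih =>
    simp only [PySem.List.insertBy]
    split
    · simp [hx]
    · simp only [List.filter_cons]
      rw [ih]

theorem filter_insertBy_of_eq {α κ : Type} [LinearOrder κ] (key : α → κ) (t : κ)
    (x : α) (ys : List α) (hx : key x = t)
    (hs : ys.Pairwise (fun a b => key a ≤ key b)) :
    (PySem.List.insertBy (fun a b => decide (key a < key b)) x ys).filter
        (fun c => decide (key c = t))
      = ys.filter (fun c => decide (key c = t)) ++ [x] := by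
  induction ys with
  | nil => simp [PySem.List.insertBy, hx]
  | cons y ys ih =>
    simp only [PySem.List.insertBy]
    split
    · rename_i hlt
      have hlt' : key x < key y := of_decide_eq_true hlt
      have hnil : (y :: ys).filter (fun c => decide (key c = t)) = [] := by
        rw [List.filter_eq_nil_iff]
        intro z hz
        have hyz : key y ≤ key z := by
          rcases List.mem_cons.mp hz with h | h
          · exact h ▸ le_refl _
          · exact (List.pairwise_cons.mp hs).1 z h
        have : t < key z := lt_of_lt_of_le (hx ▸ hlt') hyz
        simp [this.ne']
      rw [List.filter_cons_of_pos (by simp [hx]), hnil]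
      rfl
    · simp only [List.filter_cons]
      rw [ih (List.pairwise_cons.mp hs).2]
      split <;> simp

theorem sorted_filter_key_eq {α κ : Type} [LinearOrder κ] (xs : List α) (key : α → κ) (t : κ) :
    (PySem.List.sorted xs key false).filter (fun c => decide (key c = t))
      = xs.filter (fun c => decide (key c = t)) := by
  induction xs using List.reverseRecOn with
  | nil => rfl
  | append_singleton ys x ih =>
    have hstep : PySem.List.sorted (ys ++ [x]) key false
        = PySem.List.insertBy (fun a b => decide (key a < key b)) x
            (PySem.List.sorted ys key false) := by
      rw [PySem.List.sorted_eq_foldl_insertBy, PySem.List.sorted_eq_foldl_insertBy,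
        List.foldl_append]
      rfl
    rw [hstep, List.filter_append]
    by_cases hx : key x = t
    · rw [filter_insertBy_of_eq key t x _ hx (PySem.List.sorted_pairwise ys key), ih]
      simp [hx]
    · rw [filter_insertBy_of_ne key t x _ hx, ih]
      simp [hx]

-- ---- stepB at key k is the running best over the k-class ----

theorem foldl_stepB_eq_runBest (k : String × String) (l : List (List (String × String))) :
    ∀ b, l.foldl (stepB k) b = runBest b (l.filter (fun c => decide (caseKey c = k))) := by
  induction l with
  | nil => intro b; rfl
  | cons c l ih =>
    intro b
    simp only [List.foldl_cons, List.filter_cons]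
    by_cases h : caseKey c = k
    · simp only [h, decide_true, if_true]
      rw [ih]
      unfold runBest
      simp only [List.foldl_cons]
      congr 1
      unfold stepB bestStepO
      cases b <;> simp [h]
    · simp only [h, decide_false, Bool.false_eq_true, if_false]
      rw [ih]
      congr 1
      unfold stepB
      simp [h]

theorem runBest_some (l : List (List (String × String))) :
    ∀ p, runBest (some p) l = some (l.foldl bestStep p) := by
  induction l with
  | nil => intro p; rfl
  | cons c l ih =>
    intro p
    unfold runBest at ih ⊢
    simp only [List.foldl_cons]
    have hred : bestStepO (some p) c = some (bestStep p c) := by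
      unfold bestStepO bestStep
      exact (apply_ite some _ _ _).symm
    rw [hred, ih (bestStep p c)]

-- ---- B's fold is gScan, gScan is groupBest ----

theorem foldl_scanStep (l : List (List (String × String))) :
    ∀ (res : List (List (String × String))) (pend : Option (List (String × String))),
      (match l.foldl scanStep (res, pend) with
        | (r, some p) => r ++ [p]
        | (r, none) => r)
        = res ++ gScan pend l := by
  induction l with
  | nil =>
    intro res pend
    cases pend <;> simp [gScan]
  | cons c l ih =>
    intro res pend
    simp only [List.foldl_cons]
    cases pend with
    | none => rw [show scanStep (res, none) c = (res, some c) from rfl, ih, gScan]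
    | some p =>
      have hred : scanStep (res, some p) c
          = if caseKey p = caseKey c then
              (if caseN c > caseN p then (res, some c) else (res, some p))
            else (res ++ [p], some c) := rfl
      rw [hred]
      by_cases hk : caseKey p = caseKey c
      · rw [if_pos hk]
        conv_rhs => rw [gScan]
        rw [if_pos hk]
        by_cases hn : caseN c > caseN p
        · rw [if_pos hn, if_pos hn, ih]
        · rw [if_neg hn, if_neg hn, ih]
      · rw [if_neg hk, ih]
        conv_rhs => rw [gScan]
        rw [if_neg hk]
        simp

theorem gScan_some (l : List (List (String × String))) :
    ∀ p, gScan (some p) l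
      = ((l.takeWhile (sameK p)).foldl bestStep p) :: groupBest (l.dropWhile (sameK p)) := by
  induction l with
  | nil => intro p; simp [gScan, groupBest]
  | cons c l ih =>
    intro p
    by_cases hk : caseKey p = caseKey c
    · have hs : sameK p c = true := by simp [sameK, hk]
      have hpred : sameK (bestStep p c) = sameK p := by
        funext d
        unfold sameK bestStep
        split <;> simp [hk]
      rw [List.takeWhile_cons_of_pos hs, List.dropWhile_cons_of_pos hs]
      have hg : gScan (some p) (c :: l) = gScan (some (bestStep p c)) l := by
        rw [gScan, if_pos hk]
        unfold bestStep
        by_cases hn : caseN c > caseN p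
        · rw [if_pos hn, if_pos hn]
        · rw [if_neg hn, if_neg hn]
      rw [hg, ih (bestStep p c), hpred]
      simp
    · have hs : sameK p c = false := by simp [sameK]; exact fun e => hk e.symm
      rw [List.takeWhile_cons_of_neg (by simp [hs]), List.dropWhile_cons_of_neg (by simp [hs])]
      have hg : gScan (some p) (c :: l) = p :: gScan (some c) l := by
        rw [gScan, if_neg hk]
      rw [hg, ih c]
      simp [groupBest]

theorem gScan_none (l : List (List (String × String))) : gScan none l = groupBest l := by
  cases l with
  | nil => simp [gScan, groupBest]
  | cons c l =>
    rw [show gScan none (c :: l) = gScan (some c) l from rfl, gScan_some]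
    simp [groupBest]

-- ---- order facts on a key-sorted list ----

theorem key_lt_of_ne {c d : List (String × String)} (hle : Key c ≤ Key d)
    (hne : ¬ caseKey d = caseKey c) : Key c < Key d :=
  lt_of_le_of_ne hle (fun e => hne (toLex_inj.mp e.symm))

theorem dropWhile_gt (l : List (List (String × String))) (c : List (String × String))
    (hp : ∀ d ∈ l, Key c ≤ Key d)
    (hl : l.Pairwise (fun a b => Key a ≤ Key b)) :
    ∀ d ∈ l.dropWhile (sameK c), Key c < Key d := by
  induction l with
  | nil => intro d hd; simp at hd
  | cons e l ih =>
    rcases List.pairwise_cons.mp hl with ⟨he, hl'⟩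
    by_cases hs : sameK c e = true
    · rw [List.dropWhile_cons_of_pos hs]
      have hKe : Key e = Key c := by
        unfold sameK at hs
        have := of_decide_eq_true hs
        unfold Key
        rw [this]
      exact ih (fun d hd => hKe ▸ he d hd) hl'
    · rw [List.dropWhile_cons_of_neg hs]
      intro d hd
      have hce : Key c < Key e := by
        apply key_lt_of_ne (hp e (List.mem_cons_self))
        intro hee
        exact hs (by simp [sameK, hee])
      rcases List.mem_cons.mp hd with h | h
      · exact h ▸ hce
      · exact lt_of_lt_of_le hce (he d h)

theorem filter_eq_takeWhile (l : List (List (String × String))) (c : List (String × String))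
    (hp : ∀ d ∈ l, Key c ≤ Key d)
    (hl : l.Pairwise (fun a b => Key a ≤ Key b)) :
    l.filter (fun d => decide (caseKey d = caseKey c)) = l.takeWhile (sameK c) := by
  induction l with
  | nil => rfl
  | cons e l ih =>
    rcases List.pairwise_cons.mp hl with ⟨he, hl'⟩
    by_cases hs : caseKey e = caseKey c
    · rw [List.takeWhile_cons_of_pos (by simp [sameK, hs]), List.filter_cons_of_pos (by simp [hs])]
      have hKe : Key e = Key c := by unfold Key; rw [hs]
      rw [ih (fun d hd => hKe ▸ he d hd) hl']
    · rw [List.takeWhile_cons_of_neg (by simp [sameK, hs]), List.filter_cons_of_neg (by simp [hs])]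
      have hce : Key c < Key e := key_lt_of_ne (hp e (List.mem_cons_self)) hs
      rw [List.filter_eq_nil_iff.mpr]
      intro d hd
      have : Key c < Key d := by
        rcases List.mem_cons.mp (List.mem_cons_of_mem e hd) with h | h
        · exact h ▸ hce
        · exact lt_of_lt_of_le hce (he d hd)
      simp only [decide_eq_true_eq]
      intro hdc
      have : Key c < Key c := by
        have hKd : Key d = Key c := by unfold Key; rw [hdc]
        exact hKd ▸ this
      exact absurd this (lt_irrefl _)

theorem keysOf_mem (l : List (List (String × String))) :
    ∀ k ∈ keysOf l, ∃ d ∈ l, caseKey d = k := by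
  induction l using keysOf.induct with
  | case1 => intro k hk; simp [keysOf] at hk
  | case2 c l ih =>
    intro k hk
    rw [keysOf] at hk
    rcases List.mem_cons.mp hk with h | h
    · exact ⟨c, List.mem_cons_self, h.symm⟩
    · rcases ih k h with ⟨d, hd, he⟩
      exact ⟨d, List.mem_cons_of_mem c (List.Sublist.mem hd (List.dropWhile_sublist (sameK c))), he⟩

-- ---- groupBest on a sorted list is the per-key best, indexed by keysOf ----

theorem groupBest_eq_map (l : List (List (String × String)))
    (hl : l.Pairwise (fun a b => Key a ≤ Key b)) :
    groupBest l = (keysOf l).map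
      (fun k => (runBest none (l.filter (fun c => decide (caseKey c = k)))).getD []) := by
  induction l using groupBest.induct with
  | case1 => simp [groupBest, keysOf]
  | case2 c l ih =>
    rcases List.pairwise_cons.mp hl with ⟨hc, hl'⟩
    rw [groupBest, keysOf, List.map_cons]
    have hdrop : (l.dropWhile (sameK c)).Pairwise (fun a b => Key a ≤ Key b) :=
      List.Pairwise.sublist (List.dropWhile_sublist (sameK c)) hl'
    congr 1
    · -- head: the first group's best
      rw [List.filter_cons_of_pos (p := fun d => decide (caseKey d = caseKey c)) (by simp)]
      have hfil : l.filter (fun d => decide (caseKey d = caseKey c)) = l.takeWhile (sameK c) :=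
        filter_eq_takeWhile l c hc hl'
      rw [hfil]
      rw [show runBest none ((c :: l.takeWhile (sameK c))) = runBest (some c) (l.takeWhile (sameK c)) from rfl]
      rw [runBest_some]
      rfl
    · -- tail: every later key misses both c and the first group
      rw [ih hdrop]
      apply List.map_congr_left
      intro k hk
      rcases keysOf_mem _ k hk with ⟨d, hd, hdk⟩
      have hck : Key c < toLex k := by
        have h2 := dropWhile_gt l c hc hl' d hd
        unfold Key at h2 ⊢
        rw [hdk] at h2
        exact h2
      have hkc : ¬ caseKey c = k := by
        intro e
        have : Key c = toLex k := by unfold Key; rw [e]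
        exact absurd (this ▸ hck) (lt_irrefl _)
      congr 1
      have htw : (l.takeWhile (sameK c)).filter (fun x => decide (caseKey x = k)) = [] := by
        rw [List.filter_eq_nil_iff]
        intro z hz
        have hz' : caseKey z = caseKey c := by simpa [sameK] using List.mem_takeWhile_imp hz
        simp [hz', hkc]
      have hfl : List.filter (fun x => decide (caseKey x = k)) l
          = List.filter (fun x => decide (caseKey x = k)) (List.dropWhile (sameK c) l) := by
        conv_lhs => rw [← List.takeWhile_append_dropWhile (p := sameK c) (l := l)]
        rw [List.filter_append, htw, List.nil_append]
      rw [List.filter_cons_of_neg (p := fun x => decide (caseKey x = k)) (by simp [hkc]), hfl]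

-- ---- keysOf of the sorted list is A's sorted key list ----

theorem keysOf_pairwise_and_mem (l : List (List (String × String)))
    (hl : l.Pairwise (fun a b => Key a ≤ Key b)) :
    (keysOf l).Pairwise (fun a b => (toLex a : Lex ((String × String))) < toLex b)
      ∧ ∀ k, k ∈ keysOf l ↔ ∃ d ∈ l, caseKey d = k := by
  induction l using keysOf.induct with
  | case1 => exact ⟨by simp [keysOf], by simp [keysOf]⟩
  | case2 c l ih =>
    rcases List.pairwise_cons.mp hl with ⟨hc, hl'⟩
    have hdrop : (l.dropWhile (sameK c)).Pairwise (fun a b => Key a ≤ Key b) :=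
      List.Pairwise.sublist (List.dropWhile_sublist (sameK c)) hl'
    rcases ih hdrop with ⟨hpw, hmem⟩
    constructor
    · rw [keysOf]
      rw [List.pairwise_cons]
      refine ⟨?_, hpw⟩
      intro k hk
      rcases keysOf_mem _ k hk with ⟨d, hd, hdk⟩
      have h2 := dropWhile_gt l c hc hl' d hd
      unfold Key at h2
      rw [hdk] at h2
      exact h2
    · intro k
      rw [keysOf, List.mem_cons, hmem]
      constructor
      · rintro (h | ⟨d, hd, he⟩)
        · exact ⟨c, List.mem_cons_self, h.symm⟩
        · exact ⟨d, List.mem_cons_of_mem c (List.Sublist.mem hd (List.dropWhile_sublist (sameK c))), he⟩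
      · rintro ⟨d, hd, he⟩
        rcases List.mem_cons.mp hd with h | h
        · exact Or.inl (by rw [← he, h])
        · rcases (List.mem_append.mp
            (by rw [List.takeWhile_append_dropWhile (p := sameK c)]; exact h :
              d ∈ l.takeWhile (sameK c) ++ l.dropWhile (sameK c))) with h' | h'
          · left
            have hzc : caseKey d = caseKey c := by simpa [sameK] using List.mem_takeWhile_imp h' 
            rw [← he, hzc]
          · exact Or.inr ⟨d, h', he⟩

-- ---- assembly ----

theorem alt_eq_groupBest (cases : List (List (String × String))) :
    select_representative_ecg_cases_alt cases
      = groupBest (PySem.List.sorted cases Key false) := by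
  unfold select_representative_ecg_cases_alt
  rw [sorted2_eq_sorted_toLex]
  rw [show (fun c : List (String × String) =>
      (toLex (((PySem.Dict.get? ⟨c⟩ "Dimension").getD "", (PySem.Dict.get? ⟨c⟩ "Solver").getD ""))
        : Lex ((String × String)))) = Key from rfl]
  rw [← gScan_none]
  have h := foldl_scanStep (PySem.List.sorted cases Key false) [] none
  rw [List.nil_append] at h
  exact h

theorem a_eq_map (cases : List (List (String × String))) :
    select_representative_ecg_cases cases
      = (PySem.List.sorted (PySem.Set.ofList (cases.map caseKey))
          (fun p => (toLex ((p.1, p.2)) : Lex ((String × String)))) false).map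
          (fun k => ((cases.foldl (stepB k) none).getD [])) := by
  unfold select_representative_ecg_cases
  rw [sorted2_eq_sorted_toLex]
  have hk : (cases.foldl stepA PySem.Dict.empty).keys = PySem.Set.ofList (cases.map caseKey) := by
    rw [foldl_keys, PySem.Dict.keys_empty]
    rfl
  rw [hk]
  have hv : (fun k => (((cases.foldl stepA PySem.Dict.empty).get? k).getD
        ([] : List (String × String))))
      = (fun k => ((cases.foldl (stepB k) none).getD [])) := by
    funext k
    rw [foldl_get?, PySem.Dict.get?_empty]
  rw [hv]

-- ===== VERDICT (by name: the statement is the Claim_ definition above) =====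
theorem select_representative_ecg_cases_spec : Claim_equal_select_representative_ecg_cases := by
  intro cases _ _
  unfold Spec_select_representative_ecg_cases
  have hS_pw := PySem.List.sorted_pairwise cases Key
  obtain ⟨hpw, hmem⟩ := keysOf_pairwise_and_mem (PySem.List.sorted cases Key false) hS_pw
  have hkeys : PySem.List.sorted (PySem.Set.ofList (cases.map caseKey))
      (fun p => (toLex ((p.1, p.2)) : Lex ((String × String)))) false
      = keysOf (PySem.List.sorted cases Key false) := by
    apply PySem.List.sorted_eq_of_perm_of_pairwise_lt
    · rw [List.perm_ext_iff_of_nodup]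
      · intro k
        rw [hmem k, PySem.Set.mem_ofList]
        constructor
        · rintro ⟨d, hd, he⟩
          exact List.mem_map.mpr ⟨d, (PySem.List.mem_sorted _ _ _ _).mp hd, he⟩
        · intro h
          rcases List.mem_map.mp h with ⟨d, hd, he⟩
          exact ⟨d, (PySem.List.mem_sorted _ _ _ _).mpr hd, he⟩
      · exact hpw.imp (fun h e => absurd (e ▸ h) (lt_irrefl _))
      · exact PySem.Set.nodup_ofList _
    · exact hpw
  have hval : ∀ k, cases.foldl (stepB k) none
      = runBest none ((PySem.List.sorted cases Key false).filter
          (fun c => decide (caseKey c = k))) := by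
    intro k
    rw [foldl_stepB_eq_runBest]
    congr 1
    have hp : (fun c => decide (caseKey c = k)) = (fun c => decide (Key c = toLex k)) := by
      funext c
      simp [Key]
    rw [hp]
    exact (sorted_filter_key_eq cases Key (toLex k)).symm
  rw [a_eq_map, alt_eq_groupBest, hkeys, groupBest_eq_map _ hS_pw]
  apply List.map_congr_left
  intro k _
  rw [hval k]
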